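-- pv_equiv track=rewrite | github.com/longxiaoyun/crawlee-python | platform/api/src/crawlee_platform/worker/runner.py | _requirement_line_installs_crawlee_package
-- ===== SOURCE A (Python) =====
-- def _requirement_line_installs_crawlee_package(line: str) -> bool:
--     """Return whether a pip requirements line installs the ``crawlee`` distribution (not ``crawlee-*``)."""
--     main = line.split('#', 1)[0].strip()
--     if not main:
--         return False
--     main = main.split(';', 1)[0].strip()
--     token = main.split()[0]
--     token = token.split('[', 1)[0]
--     token = token.split('@', 1)[0].strip()
--     for sep in ('==', '>=', '<=', '~=', '!=', '>', '<'):
--         if sep in token: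
--             token = token.split(sep, 1)[0]
--             break
--     return token == 'crawlee'
-- ===== SOURCE B (Python) =====
-- _OPERATORS = ('==', '>=', '<=', '~=', '!=', '>', '<')
--
--
-- def _requirement_line_installs_crawlee_package(line: str) -> bool:
--     """Return whether a pip requirements line installs the ``crawlee`` distribution (not ``crawlee-*``)."""
--     main = line.split('#', 1)[0].strip()
--     if not main:
--         return False
--     # One left-to-right scan: the requirement name ends at the first
--     # whitespace character, ';', '[' or '@'.
--     name_chars = []
--     for c in main:
--         if c.isspace() or c == ';' or c == '[' or c == '@':
--             break
--         name_chars.append(c)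
--     name = ''.join(name_chars)
--     if not name.startswith('crawlee'):
--         return False
--     rest = name[len('crawlee'):]
--     if not rest:
--         return True
--     for op in _OPERATORS:
--         if op in rest:
--             return rest.startswith(op)
--     return False
-- ===== Notes on version B (the rewrite author's own statement) =====
-- stated objective: alternative
-- what changed: B replaces A's chain of split('#')/split(';')/split()/split('[')/split('@') token extraction by one left-to-right scan that cuts the requirement name at the first delimiter, then a 'crawlee' prefix test plus an operator check on the remainder only.
-- outside the precondition, e.g. on _requirement_line_installs_crawlee_package('; x'): A raises IndexError, B returns False
import Mathlib
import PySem

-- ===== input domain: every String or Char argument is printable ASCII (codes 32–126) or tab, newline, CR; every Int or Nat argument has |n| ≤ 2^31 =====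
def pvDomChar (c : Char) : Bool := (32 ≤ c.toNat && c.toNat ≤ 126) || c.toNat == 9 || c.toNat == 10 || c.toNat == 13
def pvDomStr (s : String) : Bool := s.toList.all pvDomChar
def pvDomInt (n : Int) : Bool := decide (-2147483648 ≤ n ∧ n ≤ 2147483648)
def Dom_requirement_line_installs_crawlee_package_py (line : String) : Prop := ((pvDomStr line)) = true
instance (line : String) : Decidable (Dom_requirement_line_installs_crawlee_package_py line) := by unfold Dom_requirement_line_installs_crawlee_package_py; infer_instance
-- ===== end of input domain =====

-- B rechecks the requirement name with one left-to-right scan and a prefix test instead of A's chain of splits;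
-- equivalence of the RETURN value is proved on every line whose first effective character is not ';' (there A raises).

-- ===== PORT A =====
-- the operator tuple ('==', '>=', '<=', '~=', '!=', '>', '<') and the literal 'crawlee', written verbatim in both sources
def pvOps : List (List Char) := [['=','='], ['>','='], ['<','='], ['~','='], ['!','='], ['>'], ['<']]
def pvCrawlee : List Char := ['c','r','a','w','l','e','e']

-- `for sep in (...): if sep in token: token = token.split(sep, 1)[0]; break`
def pvOpSplit : List (List Char) → List Char → List Char
  | [], token => token
  | sep :: rest, token =>
    if PySem.Chars.isIn sep token then ((PySem.Chars.splitMax? token sep 1).getD []).headD []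
    else pvOpSplit rest token

def requirement_line_installs_crawlee_package_py (line : String) : Bool :=
  let main := PySem.Chars.strip (((PySem.Chars.splitMax? line.toList ['#'] 1).getD []).headD [])
  if main.isEmpty then false
  else
    let main2 := PySem.Chars.strip (((PySem.Chars.splitMax? main [';'] 1).getD []).headD [])
    -- `main.split()[0]` raises IndexError when main2 has no word; Pre_ excludes exactly those lines
    let token0 := (PySem.Chars.split₀ main2).headD []
    let token1 := ((PySem.Chars.splitMax? token0 ['['] 1).getD []).headD []
    let token2 := PySem.Chars.strip (((PySem.Chars.splitMax? token1 ['@'] 1).getD []).headD [])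
    pvOpSplit pvOps token2 == pvCrawlee

-- ===== PORT B =====
-- `for c in main: if c.isspace() or c in ';[@': break / name_chars.append(c)`
def pvTakeName : List Char → List Char
  | [] => []
  | c :: rest =>
    if PySem.Chars.isspace c || c == ';' || c == '[' || c == '@' then []
    else c :: pvTakeName rest

-- `for op in _OPERATORS: if op in rest: return rest.startswith(op)` and the final `return False`
def pvOpCheck : List (List Char) → List Char → Bool
  | [], _ => false
  | op :: t, rest =>
    if PySem.Chars.isIn op rest then PySem.Chars.startswith rest op else pvOpCheck t rest

def requirement_line_installs_crawlee_package_py_alt (line : String) : Bool :=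
  let main := PySem.Chars.strip (((PySem.Chars.splitMax? line.toList ['#'] 1).getD []).headD [])
  if main.isEmpty then false
  else
    let name := pvTakeName main
    if PySem.Chars.startswith name pvCrawlee then
      let rest := name.drop 7   -- name[len('crawlee'):]
      if rest.isEmpty then true else pvOpCheck pvOps rest
    else false

-- ===== PRECONDITION & SPEC =====
-- Pre_ excludes exactly the lines whose first character after dropping the '#'-comment and stripping
-- whitespace is ';' (an empty requirement before an environment marker): there A raises IndexError
-- at `main.split()[0]` while B returns a value, so A returns normally precisely on Pre_.
def Pre_requirement_line_installs_crawlee_package_py (line : String) : Prop :=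
  (PySem.Chars.strip (((PySem.Chars.splitMax? line.toList ['#'] 1).getD []).headD [])).head? ≠ some ';'
instance (line : String) : Decidable (Pre_requirement_line_installs_crawlee_package_py line) := by unfold Pre_requirement_line_installs_crawlee_package_py; infer_instance

def pvWitness_requirement_line_installs_crawlee_package_py : String := "crawlee==1.0  # pinned"

def Spec_requirement_line_installs_crawlee_package_py (line : String) (out : Bool) : Prop := out = requirement_line_installs_crawlee_package_py_alt line
instance (line : String) (out : Bool) : Decidable (Spec_requirement_line_installs_crawlee_package_py line out) := by unfold Spec_requirement_line_installs_crawlee_package_py; infer_instance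

-- ===== CLAIM (what is proved, stated in full; the proofs are below) =====
def Claim_equal_requirement_line_installs_crawlee_package_py : Prop := ∀ (line : String), Dom_requirement_line_installs_crawlee_package_py line → Pre_requirement_line_installs_crawlee_package_py line → Spec_requirement_line_installs_crawlee_package_py line (requirement_line_installs_crawlee_package_py line)


-- ===== LEMMAS AND PROOFS =====

-- `x.split(sep, 1)[0]` is the part of x before the first occurrence of sep: pvBefore
def pvBefore (sep : List Char) : List Char → List Char
  | [] => []
  | c :: r => if sep.isPrefixOf (c :: r) then [] else c :: pvBefore sep r

theorem pv_go0 (sep : List Char) (fuel : Nat) (l cur : List Char) (acc : List (List Char)) :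
    PySem.Chars.splitOnMax.go sep fuel 0 l cur acc = ((cur.reverse ++ l) :: acc).reverse := by
  match fuel, l with
  | 0, l => rw [PySem.Chars.splitOnMax.go]
  | f+1, [] => rw [PySem.Chars.splitOnMax.go] <;> simp
  | f+1, c :: r => rw [PySem.Chars.splitOnMax.go] <;> simp

theorem pv_go1 (sep : List Char) (l : List Char) (f : Nat) (cur : List Char) (acc : List (List Char))
    (h : l.length ≤ f) :
    ∃ t, PySem.Chars.splitOnMax.go sep (f+1) 1 l cur acc
        = acc.reverse ++ (cur.reverse ++ pvBefore sep l) :: t := by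
  induction l generalizing f cur acc with
  | nil => exact ⟨[], by rw [PySem.Chars.splitOnMax.go] <;> simp [pvBefore]⟩
  | cons c r ih =>
    rw [PySem.Chars.splitOnMax.go]
    simp only [show (1:Nat) ≠ 0 by decide, if_false]
    by_cases hp : sep.isPrefixOf (c :: r)
    · refine ⟨[List.drop sep.length (c :: r)], ?_⟩
      simp [hp, pv_go0, pvBefore]
    · obtain ⟨f', rfl⟩ : ∃ f', f = f' + 1 := ⟨f - 1, by simp at h; omega⟩
      obtain ⟨t, ht⟩ := ih (f := f') (c :: cur) acc (by simp at h; omega)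
      refine ⟨t, ?_⟩
      simp [hp, ht, pvBefore]

theorem pv_splitHead (s sep : List Char) (hsep : sep ≠ []) :
    ((PySem.Chars.splitMax? s sep 1).getD []).headD [] = pvBefore sep s := by
  obtain ⟨t, ht⟩ := pv_go1 sep s s.length [] [] le_rfl
  simp [PySem.Chars.splitMax?, PySem.Chars.splitOnMax, hsep, ht]

theorem pv_goS0 (l : List Char) (cur : List Char) (acc : List (List Char)) (x : List Char) :
    ∃ t, PySem.Chars.split₀.go l cur (acc ++ [x]) = x :: t := by
  induction l generalizing cur acc with
  | nil =>
    rw [PySem.Chars.split₀.go]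
    by_cases hc : cur.isEmpty <;> simp [hc]
  | cons c r ih =>
    rw [PySem.Chars.split₀.go]
    by_cases hw : PySem.Chars.isspace c
    · by_cases hc : cur.isEmpty
      · simpa [hw, hc] using ih [] acc
      · have := ih [] (cur.reverse :: acc)
        simpa [hw, hc] using this
    · simpa [hw] using ih (c :: cur) acc

theorem pv_goS1 (l cur : List Char) (hcur : cur ≠ []) :
    ∃ t, PySem.Chars.split₀.go l cur []
        = (cur.reverse ++ l.takeWhile (fun c => !PySem.Chars.isspace c)) :: t := by
  induction l generalizing cur with
  | nil => exact ⟨[], by rw [PySem.Chars.split₀.go]; simp [hcur, List.isEmpty_iff]⟩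
  | cons c r ih =>
    rw [PySem.Chars.split₀.go]
    by_cases hw : PySem.Chars.isspace c
    · obtain ⟨t, ht⟩ := pv_goS0 r [] [] cur.reverse
      simp only [List.nil_append] at ht
      exact ⟨t, by simp [hw, List.isEmpty_iff, hcur, ht]⟩
    · obtain ⟨t, ht⟩ := ih (c :: cur) (by simp)
      exact ⟨t, by simp [hw, ht]⟩

theorem pv_split0_head (l : List Char) (h : ∀ c r, l = c :: r → PySem.Chars.isspace c = false) :
    (PySem.Chars.split₀ l).headD [] = l.takeWhile (fun c => !PySem.Chars.isspace c) := by
  match l with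
  | [] => rw [PySem.Chars.split₀, PySem.Chars.split₀.go]; simp
  | c :: r =>
    have hw := h c r rfl
    obtain ⟨t, ht⟩ := pv_goS1 r [c] (by simp)
    rw [PySem.Chars.split₀, PySem.Chars.split₀.go]
    simp [hw, ht]

theorem pv_before_single (c : Char) (l : List Char) :
    pvBefore [c] l = l.takeWhile (fun d => !(d == c)) := by
  induction l with
  | nil => rfl
  | cons d r ih =>
    by_cases h : c = d <;> simp [pvBefore, List.isPrefixOf, h, ih, List.takeWhile_cons, beq_iff_eq]
    · exact fun h' => absurd h'.symm h

theorem pv_before_prefix (sep l : List Char) : pvBefore sep l <+: l := by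
  induction l with
  | nil => simp [pvBefore]
  | cons c r ih =>
    by_cases h : sep.isPrefixOf (c :: r) <;> simp [pvBefore, h]
    exact ih

theorem pv_before_append (c : Char) (t pre rest : List Char) (h : ∀ p ∈ pre, p ≠ c) :
    pvBefore (c :: t) (pre ++ rest) = pre ++ pvBefore (c :: t) rest := by
  induction pre with
  | nil => rfl
  | cons p pre' ih =>
    have hpc : ¬ (c = p) := fun hh => (h p (by simp)) hh.symm
    simp [pvBefore, List.isPrefixOf, hpc, ih (fun q hq => h q (by simp [hq]))]

theorem pv_before_nil_iff (op rest : List Char) (hr : rest ≠ []) :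
    (pvBefore op rest = [] ↔ op.isPrefixOf rest) := by
  match rest with
  | c :: r =>
    by_cases h : op.isPrefixOf (c :: r) <;> simp [pvBefore, h]

theorem pv_rstrip_cons (c : Char) (r : List Char) :
    PySem.Chars.rstrip (c :: r)
      = if PySem.Chars.rstrip r = [] then (if PySem.Chars.isspace c then [] else [c])
        else c :: PySem.Chars.rstrip r := by
  simp only [PySem.Chars.rstrip, List.reverse_cons, List.dropWhile_append]
  by_cases h : (List.dropWhile PySem.Chars.isspace r.reverse) = []
  · simp [h]
    by_cases hw : PySem.Chars.isspace c <;> simp [hw]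
  · simp [h, List.isEmpty_iff]

theorem pv_takeWhile_rstrip (l : List Char) :
    (PySem.Chars.rstrip l).takeWhile (fun c => !PySem.Chars.isspace c)
      = l.takeWhile (fun c => !PySem.Chars.isspace c) := by
  induction l with
  | nil => rfl
  | cons c r ih =>
    rw [pv_rstrip_cons]
    by_cases h : PySem.Chars.rstrip r = []
    · rw [h] at ih
      by_cases hw : PySem.Chars.isspace c <;> simp [h, hw, ← ih]
    · by_cases hw : PySem.Chars.isspace c <;> simp [h, hw, ih]

theorem pv_strip_self (l : List Char) (h : ∀ c ∈ l, PySem.Chars.isspace c = false) :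
    PySem.Chars.strip l = l := by
  have h1 : PySem.Chars.lstrip l = l := by
    rw [PySem.Chars.lstrip, List.dropWhile_eq_self_iff]
    intro hl
    simp [h _ (List.getElem_mem hl)]
  have h2 : PySem.Chars.rstrip l = l := by
    rw [PySem.Chars.rstrip, List.dropWhile_eq_self_iff.2, List.reverse_reverse]
    intro hl
    have hlen : l.length - 1 < l.length := by simp at hl; omega
    simp [h _ (List.getElem_mem hlen)]
  rw [PySem.Chars.strip, h1, h2]

theorem pv_rstrip_prefix (y : List Char) : PySem.Chars.rstrip y <+: y := by
  rw [PySem.Chars.rstrip, ← List.reverse_suffix]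
  simpa using List.dropWhile_suffix (l := y.reverse) PySem.Chars.isspace

theorem pv_strip_head (x : List Char) (c : Char) (r : List Char)
    (h : PySem.Chars.strip x = c :: r) : PySem.Chars.isspace c = false := by
  rw [PySem.Chars.strip] at h
  have hp : c :: r <+: PySem.Chars.lstrip x := h ▸ pv_rstrip_prefix _
  have hh : (PySem.Chars.lstrip x).head? = some c := by
    obtain ⟨s, hs⟩ := hp; rw [← hs]; rfl
  have h2 := List.head?_dropWhile_not PySem.Chars.isspace x
  rw [PySem.Chars.lstrip] at hh
  rw [hh] at h2
  exact h2

theorem pv_infix_append (c : Char) (t pre rest : List Char) (h : c ∉ pre) :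
    ((c :: t) <:+: pre ++ rest ↔ (c :: t) <:+: rest) := by
  induction pre with
  | nil => simp
  | cons p pre' ih =>
    rw [List.cons_append, List.infix_cons_iff]
    simp only [List.mem_cons, not_or] at h
    constructor
    · rintro (hpre | hinf)
      · rw [List.cons_prefix_cons] at hpre
        exact absurd hpre.1 h.1
      · exact (ih h.2).1 hinf
    · intro hr
      exact Or.inr ((ih h.2).2 hr)

theorem pv_takeName_eq (l : List Char) :
    pvTakeName l = l.takeWhile
      (fun c => !(PySem.Chars.isspace c || c == ';' || c == '[' || c == '@')) := by
  induction l with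
  | nil => rfl
  | cons c r ih =>
    by_cases h1 : PySem.Chars.isspace c <;> by_cases h2 : c = ';' <;> by_cases h3 : c = '[' <;>
      by_cases h4 : c = '@' <;> simp [pvTakeName, h1, h2, h3, h4, ih]

theorem pv_opSplit_prefix (ops : List (List Char)) (tok : List Char)
    (h : ∀ op ∈ ops, op ≠ []) : pvOpSplit ops tok <+: tok := by
  induction ops with
  | nil => simp [pvOpSplit]
  | cons op t ih =>
    by_cases hin : PySem.Chars.isIn op tok
    · simp only [pvOpSplit, hin, if_true]
      rw [pv_splitHead _ _ (h op (by simp))]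
      exact pv_before_prefix _ _
    · simp only [pvOpSplit, hin, Bool.false_eq_true, if_false]
      exact ih (fun o ho => h o (by simp [ho]))

theorem pv_opAgree (ops : List (List Char))
    (h : ∀ op ∈ ops, op ≠ [] ∧ op.headD ' ' ∉ pvCrawlee)
    (rest : List Char) (hr : rest ≠ []) :
    (pvOpSplit ops (pvCrawlee ++ rest) == pvCrawlee) = pvOpCheck ops rest := by
  induction ops with
  | nil =>
    simp only [pvOpSplit, pvOpCheck]
    simp [List.append_right_eq_self, hr]
  | cons op t ih =>
    obtain ⟨hne, hnm⟩ := h op (by simp)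
    obtain ⟨c, tl, rfl⟩ : ∃ c tl, op = c :: tl := by
      cases op with
      | nil => exact absurd rfl hne
      | cons c tl => exact ⟨c, tl, rfl⟩
    simp only [List.headD_cons] at hnm
    have hIn : PySem.Chars.isIn (c :: tl) (pvCrawlee ++ rest) = PySem.Chars.isIn (c :: tl) rest := by
      rw [Bool.eq_iff_iff, PySem.Chars.isIn_iff_infix, PySem.Chars.isIn_iff_infix]
      exact pv_infix_append c tl pvCrawlee rest hnm
    by_cases hin : PySem.Chars.isIn (c :: tl) rest
    · simp only [pvOpSplit, pvOpCheck, hIn, hin, if_true]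
      rw [pv_splitHead _ _ (by simp),
        pv_before_append c tl pvCrawlee rest (fun p hp hpc => hnm (hpc ▸ hp))]
      rw [Bool.eq_iff_iff]
      simp only [beq_iff_eq]
      rw [List.append_right_eq_self, pv_before_nil_iff _ _ hr]
      simp [PySem.Chars.startswith]
    · simp only [pvOpSplit, pvOpCheck, hIn, hin, Bool.false_eq_true, if_false]
      exact ih (fun o ho => h o (by simp [ho]))

theorem pv_token_eq (c₀ : Char) (m' : List Char) (hws : PySem.Chars.isspace c₀ = false)
    (hsemi : c₀ ≠ ';') :
    PySem.Chars.strip (pvBefore ['@'] (pvBefore ['['] ((PySem.Chars.split₀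
        (PySem.Chars.strip (pvBefore [';'] (c₀ :: m')))).headD [])))
      = pvTakeName (c₀ :: m') := by
  have h1 : pvBefore [';'] (c₀ :: m') = c₀ :: m'.takeWhile (fun d => !(d == ';')) := by
    rw [pv_before_single]; simp [hsemi]
  set l := m'.takeWhile (fun d => !(d == ';')) with hl
  have h2 : PySem.Chars.strip (c₀ :: l) = PySem.Chars.rstrip (c₀ :: l) := by
    rw [PySem.Chars.strip, PySem.Chars.lstrip, List.dropWhile_cons]
    simp [hws]
  have h3 : ∀ c r, PySem.Chars.rstrip (c₀ :: l) = c :: r → PySem.Chars.isspace c = false := by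
    intro c r hcr
    have hp := pv_rstrip_prefix (c₀ :: l)
    rw [hcr, List.cons_prefix_cons] at hp
    exact hp.1 ▸ hws
  rw [h1, h2, pv_split0_head _ h3, pv_takeWhile_rstrip]
  rw [show c₀ :: l = (c₀ :: m').takeWhile (fun d => !(d == ';')) from by
    simp [hsemi]; exact hl]
  rw [pv_before_single, pv_before_single]
  simp only [List.takeWhile_takeWhile]
  rw [pv_strip_self, pv_takeName_eq]
  · congr 1
    funext a
    by_cases g1 : PySem.Chars.isspace a <;> by_cases g2 : a = ';' <;> by_cases g3 : a = '[' <;>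
      by_cases g4 : a = '@' <;> simp [g1, g2, g3, g4]
  · intro c hc
    have := List.mem_takeWhile_imp hc
    simp only [decide_eq_true_eq] at this
    simpa using this.2.2.1

theorem pv_final (name : List Char) :
    (pvOpSplit pvOps name == pvCrawlee)
      = (if PySem.Chars.startswith name pvCrawlee then
           (if (name.drop 7).isEmpty then true else pvOpCheck pvOps (name.drop 7))
         else false) := by
  by_cases hsw : PySem.Chars.startswith name pvCrawlee
  · obtain ⟨s, rfl⟩ : ∃ s, name = pvCrawlee ++ s := by
      have hp : pvCrawlee <+: name :=
        List.isPrefixOf_iff_prefix.mp (by simpa [PySem.Chars.startswith] using hsw)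
      exact ⟨hp.choose, hp.choose_spec.symm⟩
    have hdrop : (pvCrawlee ++ s).drop 7 = s := by
      rw [show (7:Nat) = pvCrawlee.length by simp [pvCrawlee]]
      exact List.drop_left
    rw [if_pos hsw, hdrop]
    by_cases hs : s = []
    · subst hs
      simp only [List.append_nil, List.isEmpty_nil, if_true]
      decide
    · rw [if_neg (by simp [List.isEmpty_iff, hs])]
      exact pv_opAgree pvOps (by decide) s hs
  · rw [if_neg hsw]
    rw [beq_eq_false_iff_ne]
    intro hEq
    have hpre := pv_opSplit_prefix pvOps name (by decide)
    rw [hEq] at hpre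
    exact hsw (by simpa [PySem.Chars.startswith] using List.isPrefixOf_iff_prefix.mpr hpre)

-- ===== VERDICT (by name: the statement is the Claim_ definition above) =====
theorem requirement_line_installs_crawlee_package_py_spec : Claim_equal_requirement_line_installs_crawlee_package_py := by
  intro line _dom hpre
  unfold Pre_requirement_line_installs_crawlee_package_py at hpre
  unfold Spec_requirement_line_installs_crawlee_package_py
  unfold requirement_line_installs_crawlee_package_py requirement_line_installs_crawlee_package_py_alt
  set M := PySem.Chars.strip (((PySem.Chars.splitMax? line.toList ['#'] 1).getD []).headD []) with hM
  by_cases hME : M = []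
  · simp [hME]
  · obtain ⟨c₀, m', hMc⟩ := List.exists_cons_of_ne_nil hME
    have hws : PySem.Chars.isspace c₀ = false := pv_strip_head _ _ _ (hM.symm.trans hMc)
    have hsemi : c₀ ≠ ';' := by
      rw [hMc] at hpre
      simpa using hpre
    rw [hMc]
    simp only [List.isEmpty_cons, Bool.false_eq_true, if_false]
    rw [pv_splitHead _ [';'] (by decide), pv_splitHead _ ['['] (by decide),
      pv_splitHead _ ['@'] (by decide)]
    rw [pv_token_eq c₀ m' hws hsemi, pv_final]
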